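-- pv_equiv track=rewrite | github.com/2026Arbitriumhackthon/starkverifier | contracts/stylus/tools/gen_constants.py | compute_inv
-- ===== SOURCE A (Python) =====
-- def compute_inv(p_val):
--     """Compute -p^{-1} mod 2^64 using Hensel's lifting."""
--     W = 1 << 64
--     p0 = p_val % W
--     # Start with inverse mod 2
--     inv = 1
--     for i in range(6):  # 6 iterations: 2^(2^6) = 2^64
--         inv = (inv * (2 - p0 * inv)) % W
--     # Verify: p0 * inv ≡ 1 (mod 2^64)
--     assert (p0 * inv) % W == 1, f"inv computation failed"
--     # We want -p^{-1} mod 2^64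
--     return (W - inv) % W
-- ===== SOURCE B (Python) =====
-- def compute_inv(p_val):
--     """Compute -p^{-1} mod 2^64 directly as the modular inverse of -p."""
--     return pow(-p_val, -1, 1 << 64)
-- ===== Notes on version B (the rewrite author's own statement) =====
-- stated objective: simpler
-- what changed: Replaces the 6-iteration Hensel lifting loop, the assert, and the final (W - inv) % W reflection with a single built-in extended-Euclidean inverse of -p: pow(-p_val, -1, 1 << 64).
import Mathlib
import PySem

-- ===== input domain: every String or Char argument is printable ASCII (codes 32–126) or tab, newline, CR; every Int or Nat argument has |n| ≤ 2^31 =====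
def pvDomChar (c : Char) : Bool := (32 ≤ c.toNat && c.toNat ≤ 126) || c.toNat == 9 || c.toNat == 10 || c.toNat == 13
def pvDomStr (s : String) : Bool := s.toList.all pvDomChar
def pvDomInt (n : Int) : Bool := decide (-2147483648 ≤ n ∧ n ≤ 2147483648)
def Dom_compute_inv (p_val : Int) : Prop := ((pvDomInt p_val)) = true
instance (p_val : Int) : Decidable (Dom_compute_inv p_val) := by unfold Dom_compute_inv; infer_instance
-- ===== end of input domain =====

-- B replaces the Hensel loop, the assert and the final (W - inv) % W reflection by one built-in
-- extended-Euclidean inversion of -p: pow(-p_val, -1, 1 << 64) — simpler, same values on odd p.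

-- ===== PORT A =====
-- literal port of A: 6-iteration Hensel lifting, then (W - inv) % W
def compute_inv (p_val : Int) : Int :=
  let W : Int := 2 ^ 64
  let p0 := PySem.Int.mod p_val W
  let inv := (PySem.List.pyRange 0 6 1).foldl
    (fun inv _ => PySem.Int.mod (inv * (2 - p0 * inv)) W) 1
  -- assert (p0 * inv) % W == 1: holds on Pre_ (odd p_val); on even p_val Python raises AssertionError
  PySem.Int.mod (W - inv) W

-- ===== PORT B =====
-- literal port of B: pow(-p_val, -1, 1 << 64) is the extended-Euclid modular inverse of
-- (-p_val) mod 2^64, canonical representative in [0, 2^64)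
def compute_inv_alt (p_val : Int) : Int :=
  PySem.Int.mod (Nat.gcdA (PySem.Int.mod (-p_val) (2 ^ 64)).toNat (2 ^ 64)) (2 ^ 64)

-- ===== PRECONDITION & SPEC =====
-- Pre_ excludes even p_val: there p0 is not invertible mod 2^64, A raises AssertionError and B raises ValueError.
def Pre_compute_inv (p_val : Int) : Prop := p_val % 2 = 1
instance (p_val : Int) : Decidable (Pre_compute_inv p_val) := by unfold Pre_compute_inv; infer_instance
def pvWitness_compute_inv : Int := 7

def Spec_compute_inv (p_val : Int) (out : Int) : Prop := out = compute_inv_alt p_val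
instance (p_val : Int) (out : Int) : Decidable (Spec_compute_inv p_val out) := by unfold Spec_compute_inv; infer_instance

-- ===== CLAIM (what is proved, stated in full; the proofs are below) =====
def Claim_equal_compute_inv : Prop := ∀ (p_val : Int), Dom_compute_inv p_val → Pre_compute_inv p_val → Spec_compute_inv p_val (compute_inv p_val)

-- ===== LEMMAS AND PROOFS =====

-- taking % 2^64 does not change the residue mod any divisor of 2^64
lemma emod_pow_dvd (x : Int) (n : Nat) (hn : n ≤ 64) :
    (2:Int) ^ n ∣ x % (2 ^ 64) - x := by
  have h : x % ((2:Int) ^ 64) - x = -((2:Int) ^ 64 * (x / 2 ^ 64)) := by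
    rw [Int.emod_def]; ring
  rw [h]
  exact ((pow_dvd_pow 2 hn).mul_right _).neg_right

-- one Hensel step doubles the precision (the % W in the step keeps residues mod 2^(2n) since 2n ≤ 64)
lemma hensel_step (p0 inv : Int) (n : Nat) (hn : 2 * n ≤ 64)
    (h : (2:Int) ^ n ∣ p0 * inv - 1) :
    (2:Int) ^ (2 * n) ∣ p0 * ((inv * (2 - p0 * inv)) % ((2:Int) ^ 64)) - 1 := by
  have h1 : (2:Int) ^ (2 * n) ∣ p0 * (inv * (2 - p0 * inv)) - 1 := by
    have e : p0 * (inv * (2 - p0 * inv)) - 1 = -((p0 * inv - 1) * (p0 * inv - 1)) := by ring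
    rw [e, two_mul, pow_add]
    exact (mul_dvd_mul h h).neg_right
  have h2 : (2:Int) ^ (2 * n) ∣ p0 * ((inv * (2 - p0 * inv)) % (2 ^ 64) - inv * (2 - p0 * inv)) :=
    (emod_pow_dvd _ _ hn).mul_left p0
  have e2 : p0 * ((inv * (2 - p0 * inv)) % ((2:Int) ^ 64)) - 1
      = (p0 * (inv * (2 - p0 * inv)) - 1)
        + p0 * ((inv * (2 - p0 * inv)) % (2 ^ 64) - inv * (2 - p0 * inv)) := by ring
  rw [e2]; exact dvd_add h1 h2

-- A's loop result is an inverse of p0 mod 2^64 when p0 is odd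
lemma henselA (p0 : Int) (hodd : p0 % 2 = 1) :
    (2:Int) ^ 64 ∣ p0 * ((PySem.List.pyRange 0 6 1).foldl
      (fun inv _ => PySem.Int.mod (inv * (2 - p0 * inv)) (2 ^ 64)) 1) - 1 := by
  have hr : PySem.List.pyRange 0 6 1 = [0, 1, 2, 3, 4, 5] := by decide
  have hm : ∀ a : Int, PySem.Int.mod a ((2:Int) ^ 64) = a % 2 ^ 64 := fun a =>
    PySem.Int.mod_eq_emod_of_pos (by norm_num)
  rw [hr]
  simp only [List.foldl, hm]
  have h0 : (2:Int) ^ 1 ∣ p0 * 1 - 1 := by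
    have : (2:Int) ∣ p0 - 1 := by omega
    simpa using this
  have h1 := hensel_step p0 _ 1 (by norm_num) h0
  have h2 := hensel_step p0 _ 2 (by norm_num) h1
  have h3 := hensel_step p0 _ 4 (by norm_num) h2
  have h4 := hensel_step p0 _ 8 (by norm_num) h3
  have h5 := hensel_step p0 _ 16 (by norm_num) h4
  have h6 := hensel_step p0 _ 32 (by norm_num) h5
  exact h6

-- B's extended-Euclid value is an inverse of m mod 2^64 when m is odd and 0 ≤ m
lemma gcdA_inv (m : Int) (hm0 : 0 ≤ m) (hodd : m % 2 = 1) :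
    (2:Int) ^ 64 ∣ m * ((Nat.gcdA m.toNat (2 ^ 64)) % ((2:Int) ^ 64)) - 1 := by
  have hcop : Nat.Coprime m.toNat (2 ^ 64) := by
    apply Nat.Coprime.pow_right
    exact ((Nat.Prime.coprime_iff_not_dvd Nat.prime_two).mpr (by omega)).symm
  have hb := Nat.gcd_eq_gcd_ab m.toNat (2 ^ 64)
  rw [hcop] at hb
  have hcast : ((m.toNat : Int)) = m := Int.toNat_of_nonneg hm0
  have key : (1:Int) = m * Nat.gcdA m.toNat (2 ^ 64) + 2 ^ 64 * Nat.gcdB m.toNat (2 ^ 64) := by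
    push_cast at hb; rw [hcast] at hb; exact_mod_cast hb
  have hmod : (2:Int) ^ 64 ∣ (Nat.gcdA m.toNat (2 ^ 64)) % (2 ^ 64) - Nat.gcdA m.toNat (2 ^ 64) :=
    emod_pow_dvd _ 64 le_rfl
  have e : m * ((Nat.gcdA m.toNat (2 ^ 64)) % ((2:Int) ^ 64)) - 1
      = m * ((Nat.gcdA m.toNat (2 ^ 64)) % (2 ^ 64) - Nat.gcdA m.toNat (2 ^ 64))
        + (m * Nat.gcdA m.toNat (2 ^ 64) + 2 ^ 64 * Nat.gcdB m.toNat (2 ^ 64) - 1)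
        - 2 ^ 64 * Nat.gcdB m.toNat (2 ^ 64) := by ring
  rw [e]
  exact dvd_sub (dvd_add (hmod.mul_left m) (by rw [← key]; simp)) (Dvd.intro _ rfl)

-- two inverses of an odd m mod 2^64, both in [0, 2^64), are equal
lemma pvInvUnique (m a b : Int) (hodd : m % 2 = 1)
    (ha : (2:Int) ^ 64 ∣ m * a - 1) (hb : (2:Int) ^ 64 ∣ m * b - 1)
    (ha0 : 0 ≤ a) (ha1 : a < 2 ^ 64) (hb0 : 0 ≤ b) (hb1 : b < 2 ^ 64) : a = b := by
  have hd : (2:Int) ^ 64 ∣ m * (a - b) := by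
    have e : m * (a - b) = (m * a - 1) - (m * b - 1) := by ring
    rw [e]; exact dvd_sub ha hb
  have hcop : IsCoprime ((2:Int) ^ 64) m := by
    apply IsCoprime.pow_left
    rw [Int.isCoprime_iff_gcd_eq_one]
    show Nat.gcd (2:Int).natAbs m.natAbs = 1
    exact (Nat.prime_two.coprime_iff_not_dvd).mpr (by omega)
  obtain ⟨c, hc⟩ := hcop.dvd_of_dvd_mul_left hd
  have : c = 0 := by nlinarith
  omega

theorem compute_inv_spec : Claim_equal_compute_inv := by
  intro p_val _ hpre
  unfold Spec_compute_inv compute_inv compute_inv_alt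
  simp only []
  have hWpos : (0:Int) < 2 ^ 64 := by norm_num
  have hmm : ∀ a : Int, PySem.Int.mod a ((2:Int) ^ 64) = a % 2 ^ 64 := fun a =>
    PySem.Int.mod_eq_emod_of_pos (by norm_num)
  set p0 := PySem.Int.mod p_val (2 ^ 64) with hp0def
  have hp0e : p0 = p_val % 2 ^ 64 := hmm p_val
  have hp0odd : p0 % 2 = 1 := by
    rw [hp0e, Int.emod_emod_of_dvd _ (by norm_num : (2:Int) ∣ 2 ^ 64)]
    exact hpre
  -- A's inverse and A's result r
  set inv := (PySem.List.pyRange 0 6 1).foldl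
      (fun inv _ => PySem.Int.mod (inv * (2 - p0 * inv)) (2 ^ 64)) 1 with hinvdef
  have hinvA : (2:Int) ^ 64 ∣ p0 * inv - 1 := henselA p0 hp0odd
  set r := PySem.Int.mod (2 ^ 64 - inv) (2 ^ 64) with hrdef
  have hre : r = (2 ^ 64 - inv) % (2:Int) ^ 64 := hmm _
  -- B's modulus m = (-p_val) % 2^64 and B's result b
  set m := PySem.Int.mod (-p_val) (2 ^ 64) with hmdef
  have hme : m = (-p_val) % (2:Int) ^ 64 := hmm _
  have hmnn : 0 ≤ m := hme ▸ Int.emod_nonneg _ (by norm_num)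
  have hmodd : m % 2 = 1 := by
    rw [hme, Int.emod_emod_of_dvd _ (by norm_num : (2:Int) ∣ 2 ^ 64)]
    omega
  set b := PySem.Int.mod (Nat.gcdA m.toNat (2 ^ 64)) (2 ^ 64) with hbdef
  have hbe : b = (Nat.gcdA m.toNat (2 ^ 64)) % ((2:Int) ^ 64) := hmm _
  have hinvB : (2:Int) ^ 64 ∣ m * b - 1 := hbe ▸ gcdA_inv m hmnn hmodd
  -- r is also an inverse of m
  have hd1 : (2:Int) ^ 64 ∣ m + p0 := by
    have h1 : (2:Int) ^ 64 ∣ m - (-p_val) := hme ▸ emod_pow_dvd (-p_val) 64 le_rfl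
    have h2 : (2:Int) ^ 64 ∣ p0 - p_val := hp0e ▸ emod_pow_dvd p_val 64 le_rfl
    have e : m + p0 = (m - (-p_val)) + (p0 - p_val) := by ring
    rw [e]; exact dvd_add h1 h2
  have hd2 : (2:Int) ^ 64 ∣ r + inv := by
    have h1 : (2:Int) ^ 64 ∣ r - (2 ^ 64 - inv) := hre ▸ emod_pow_dvd (2 ^ 64 - inv) 64 le_rfl
    have e : r + inv = (r - (2 ^ 64 - inv)) + 2 ^ 64 := by ring
    rw [e]; exact dvd_add h1 ⟨1, by ring⟩
  have hinvAr : (2:Int) ^ 64 ∣ m * r - 1 := by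
    have e : m * r - 1 = (p0 * inv - 1) + (m * (r + inv) - inv * (m + p0)) := by ring
    rw [e]
    exact dvd_add hinvA (dvd_sub (hd2.mul_left m) (hd1.mul_left inv))
  exact pvInvUnique m r b hmodd hinvAr hinvB
    (hre ▸ Int.emod_nonneg _ (by norm_num)) (hre ▸ Int.emod_lt_of_pos _ hWpos)
    (hbe ▸ Int.emod_nonneg _ (by norm_num)) (hbe ▸ Int.emod_lt_of_pos _ hWpos)
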